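-- pv_equiv track=rewrite | github.com/vincent-kk/Basic-Algorithm | programmers/lv2/72411.py | solution
-- ===== SOURCE A (Python) =====
-- from typing import List
-- from collections import Counter
-- from itertools import combinations
--
-- def solution(orders: List[str], courses: List[int]) -> List[str]:
--     answer = []
--     for c in courses:
--         order = []
--         for o in orders:
--             if c > len(o):
--                 continue
--             order += combinations(sorted(o), c)
--         c = Counter(order)
--         if not c:
--             continue
--         m = max(c.values())
--         if m < 2:
--             continue
--         for course in filter(lambda x: c[x] == m, c.keys()):
--             answer.append(course)
--         answer.sort()
--     return answer
-- ===== SOURCE B (Python) =====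
-- from typing import List
-- from itertools import combinations
--
-- def solution(orders: List[str], courses: List[int]) -> List[str]:
--     # One pass over orders builds a per-size counter table; a second pass over
--     # courses reads the table; the answer is sorted once at the end.
--     sizes = list(dict.fromkeys(courses))
--     table = {}
--     for o in orders:
--         so = sorted(o)
--         for c in sizes:
--             if 0 <= c <= len(o):
--                 cnt = table.setdefault(c, {})
--                 for t in combinations(so, c):
--                     cnt[t] = cnt.get(t, 0) + 1
--     answer = []
--     for c in courses:
--         cnt = table.get(c, {})
--         if not cnt:
--             continue
--         m = max(cnt.values())
--         if m < 2:
--             continue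
--         answer.extend(k for k in cnt if cnt[k] == m)
--     answer.sort()
--     return answer
-- ===== Notes on version B (the rewrite author's own statement) =====
-- stated objective: faster
-- what changed: Instead of rescanning all orders and regenerating their combinations for every entry of courses, B makes one pass over orders that builds a per-size counter table (combinations generated once per distinct size), then a second pass over courses that only reads the table, and sorts the answer once at the end instead of after every contributing course.
import Mathlib
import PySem

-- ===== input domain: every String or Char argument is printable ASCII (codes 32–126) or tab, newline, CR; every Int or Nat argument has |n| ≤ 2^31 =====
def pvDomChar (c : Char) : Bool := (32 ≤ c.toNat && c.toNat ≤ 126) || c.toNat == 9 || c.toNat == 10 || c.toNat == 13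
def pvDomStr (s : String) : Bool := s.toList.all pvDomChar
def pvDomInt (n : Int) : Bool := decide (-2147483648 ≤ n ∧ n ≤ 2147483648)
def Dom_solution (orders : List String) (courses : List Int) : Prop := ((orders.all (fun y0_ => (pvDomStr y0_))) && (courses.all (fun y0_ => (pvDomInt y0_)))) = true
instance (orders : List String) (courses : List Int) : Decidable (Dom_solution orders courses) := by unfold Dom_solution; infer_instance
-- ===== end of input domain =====

-- B re-decomposes A: one pass over `orders` builds a per-size counter table, a second pass
-- over `courses` reads it, and the answer is sorted once at the end (objective: faster —
-- each order's combinations are generated once per distinct size, not once per course entry).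

-- ===== PORT A =====
-- shared with the B port: Python's sorted(o) over the characters of a string
-- (exact: 1-char ASCII strings compare exactly like their code points)
def pySortedChars (o : String) : List String :=
  (PySem.List.sorted o.toList (fun x => x) false).map (fun ch => String.ofList [ch])

-- shared with the B port: answer.sort() on tuples of strings; Python's tuple-of-str
-- comparison is lexicographic on the strings, i.e. lexicographic on their char lists,
-- which is exactly the List.instLinearOrder order on `List (List Char)` used as key here.
def tupleKey (t : List String) : List (List Char) := t.map String.toList

def pySortTuples (xs : List (List String)) : List (List String) :=
  @PySem.List.sorted _ _ List.instLinearOrder.toLT LinearOrder.toDecidableLT xs tupleKey false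

-- `order += combinations(sorted(o), c)` over all orders (c ≥ 0 under Pre_, so c.toNat is exact)
def buildOrderA (orders : List String) (c : Int) : List (List String) :=
  orders.foldl (fun order o =>
    if PySem.Str.len o < c then order
    else order ++ PySem.List.combinations (pySortedChars o) c.toNat) []

-- the body of A's `for c in courses` loop
def stepA (orders : List String) (answer : List (List String)) (c : Int) : List (List String) :=
  let cnt := PySem.Dict.counter (buildOrderA orders c)
  if cnt.items = [] then answer
  else
    match PySem.List.max? cnt.values (fun v => v) with
    | none => answer   -- unreachable: cnt is nonempty here
    | some m =>
      if m < 2 then answer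
      else pySortTuples (answer ++ cnt.keys.filter (fun k => cnt.getD k 0 == m))

def solution (orders : List String) (courses : List Int) : List (List String) :=
  courses.foldl (stepA orders) []

-- ===== PORT B =====
-- `for t in combinations(so, c): cnt[t] = cnt.get(t, 0) + 1`
def bumpTuples (cnt : PySem.Dict (List String) Int) (ts : List (List String)) :
    PySem.Dict (List String) Int :=
  ts.foldl (fun cnt t => cnt.insert t (cnt.getD t 0 + 1)) cnt

-- B's first pass: the per-size counter table (c ≥ 0 inside the guard, so c.toNat is exact)
def buildTable (orders : List String) (sizes : List Int) :
    PySem.Dict Int (PySem.Dict (List String) Int) :=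
  orders.foldl (fun table o =>
    let so := pySortedChars o
    sizes.foldl (fun table c =>
      if 0 ≤ c ∧ c ≤ PySem.Str.len o then
        table.insert c (bumpTuples (table.getD c PySem.Dict.empty)
          (PySem.List.combinations so c.toNat))
      else table) table) PySem.Dict.empty

-- the body of B's `for c in courses` loop
def stepB (table : PySem.Dict Int (PySem.Dict (List String) Int))
    (answer : List (List String)) (c : Int) : List (List String) :=
  let cnt := table.getD c PySem.Dict.empty
  if cnt.items = [] then answer
  else
    match PySem.List.max? cnt.values (fun v => v) with
    | none => answer   -- unreachable: cnt is nonempty here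
    | some m =>
      if m < 2 then answer
      else answer ++ cnt.keys.filter (fun k => cnt.getD k 0 == m)

def solution_alt (orders : List String) (courses : List Int) : List (List String) :=
  let table := buildTable orders (PySem.List.dedup courses)
  pySortTuples (courses.foldl (stepB table) [])

-- ===== PRECONDITION & SPEC =====
-- Pre_ excludes only inputs where A raises: a negative course size reaches
-- itertools.combinations (ValueError) as soon as there is at least one order.
def Pre_solution (orders : List String) (courses : List Int) : Prop :=
  orders = [] ∨ ∀ c ∈ courses, 0 ≤ c
instance (orders : List String) (courses : List Int) : Decidable (Pre_solution orders courses) := by unfold Pre_solution; infer_instance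

def pvWitness_solution : List String × List Int := (["ab", "ab"], [2])

def Spec_solution (orders : List String) (courses : List Int) (out : List (List String)) : Prop := out = solution_alt orders courses
instance (orders : List String) (courses : List Int) (out : List (List String)) : Decidable (Spec_solution orders courses out) := by unfold Spec_solution; infer_instance

-- ===== CLAIM (what is proved, stated in full; the proofs are below) =====
def Claim_equal_solution : Prop := ∀ (orders : List String) (courses : List Int), Dom_solution orders courses → Pre_solution orders courses → Spec_solution orders courses (solution orders courses)

-- ===== LEMMAS AND PROOFS =====

theorem tupleKey_inj : Function.Injective tupleKey :=
  List.map_injective_iff.mpr (fun _ _ h => String.toList_inj.mp h)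

theorem pySortTuples_perm (xs : List (List String)) : (pySortTuples xs).Perm xs := by
  unfold pySortTuples
  exact @PySem.List.sorted_perm (List String) (List (List Char)) List.instLinearOrder.toLT
    LinearOrder.toDecidableLT xs tupleKey false

-- sorting an already-sorted prefix again is the same as one final sort
theorem sort_merge (xs ys : List (List String)) :
    pySortTuples (pySortTuples xs ++ ys) = pySortTuples (xs ++ ys) := by
  have hp : (pySortTuples xs ++ ys).Perm (xs ++ ys) := (pySortTuples_perm xs).append_right ys
  unfold pySortTuples at hp ⊢
  exact PySem.List.sorted_eq_sorted_of_perm _ _ tupleKey tupleKey_inj hp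

-- B's increment loop extends a counter exactly like counting the concatenation
theorem bump_counter (xs ts : List (List String)) :
    bumpTuples (PySem.Dict.counter xs) ts = PySem.Dict.counter (xs ++ ts) := by
  induction ts generalizing xs with
  | nil => simp [bumpTuples]
  | cons t ts ih =>
    have h1 : (PySem.Dict.counter xs).insert t ((PySem.Dict.counter xs).getD t 0 + 1)
        = PySem.Dict.counter (xs ++ [t]) := by
      rw [PySem.Dict.counter_append_singleton]
      exact PySem.Dict.ext_iff.mpr rfl
    calc bumpTuples (PySem.Dict.counter xs) (t :: ts)
        = bumpTuples (PySem.Dict.counter (xs ++ [t])) ts := by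
          simp only [bumpTuples, List.foldl_cons, h1]
      _ = PySem.Dict.counter ((xs ++ [t]) ++ ts) := ih (xs ++ [t])
      _ = PySem.Dict.counter (xs ++ t :: ts) := by simp

-- the inner `for c in sizes` loop of B, viewed at one table entry
def innerStep (o : String) (table : PySem.Dict Int (PySem.Dict (List String) Int)) (c : Int) :
    PySem.Dict Int (PySem.Dict (List String) Int) :=
  if 0 ≤ c ∧ c ≤ PySem.Str.len o then
    table.insert c (bumpTuples (table.getD c PySem.Dict.empty)
      (PySem.List.combinations (pySortedChars o) c.toNat))
  else table

theorem innerStep_getD_ne (o : String) (tb : PySem.Dict Int (PySem.Dict (List String) Int))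
    (s c : Int) (hcs : c ≠ s) :
    (innerStep o tb s).getD c PySem.Dict.empty = tb.getD c PySem.Dict.empty := by
  unfold innerStep
  by_cases hg : 0 ≤ s ∧ s ≤ PySem.Str.len o
  · rw [if_pos hg, PySem.Dict.getD_insert, if_neg hcs]
  · rw [if_neg hg]

theorem innerStep_getD_self (o : String) (tb : PySem.Dict Int (PySem.Dict (List String) Int))
    (c : Int) :
    (innerStep o tb c).getD c PySem.Dict.empty =
      if 0 ≤ c ∧ c ≤ PySem.Str.len o then
        bumpTuples (tb.getD c PySem.Dict.empty)
          (PySem.List.combinations (pySortedChars o) c.toNat)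
      else tb.getD c PySem.Dict.empty := by
  unfold innerStep
  by_cases hg : 0 ≤ c ∧ c ≤ PySem.Str.len o
  · rw [if_pos hg, if_pos hg, PySem.Dict.getD_insert, if_pos rfl]
  · rw [if_neg hg, if_neg hg]

theorem entry_untouched (o : String) (sizes : List Int)
    (tb : PySem.Dict Int (PySem.Dict (List String) Int)) (c : Int) (h : c ∉ sizes) :
    (sizes.foldl (innerStep o) tb).getD c PySem.Dict.empty = tb.getD c PySem.Dict.empty := by
  induction sizes generalizing tb with
  | nil => rfl
  | cons s rest ih =>
    have hcs : c ≠ s := fun hh => h (hh ▸ List.mem_cons_self)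
    have hr : c ∉ rest := fun hh => h (List.mem_cons_of_mem _ hh)
    rw [List.foldl_cons, ih _ hr, innerStep_getD_ne o tb s c hcs]

theorem entry_hit (o : String) (sizes : List Int)
    (tb : PySem.Dict Int (PySem.Dict (List String) Int)) (c : Int)
    (hn : sizes.Nodup) (hc : c ∈ sizes) :
    (sizes.foldl (innerStep o) tb).getD c PySem.Dict.empty =
      if 0 ≤ c ∧ c ≤ PySem.Str.len o then
        bumpTuples (tb.getD c PySem.Dict.empty)
          (PySem.List.combinations (pySortedChars o) c.toNat)
      else tb.getD c PySem.Dict.empty := by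
  induction sizes generalizing tb with
  | nil => cases hc
  | cons s rest ih =>
    rw [List.nodup_cons] at hn
    rcases List.mem_cons.mp hc with hcs | hcr
    · subst hcs
      rw [List.foldl_cons, entry_untouched _ _ _ _ hn.1, innerStep_getD_self]
    · have hcs : c ≠ s := fun hh => hn.1 (hh ▸ hcr)
      rw [List.foldl_cons, ih _ hn.2 hcr, innerStep_getD_ne o tb s c hcs]

theorem table_entry (orders : List String) (sizes : List Int)
    (tb : PySem.Dict Int (PySem.Dict (List String) Int)) (c : Int)
    (hn : sizes.Nodup) (hc : c ∈ sizes) :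
    ((orders.foldl (fun tb o => sizes.foldl (innerStep o) tb) tb).getD c PySem.Dict.empty) =
      orders.foldl (fun d o =>
        if 0 ≤ c ∧ c ≤ PySem.Str.len o then
          bumpTuples d (PySem.List.combinations (pySortedChars o) c.toNat)
        else d) (tb.getD c PySem.Dict.empty) := by
  induction orders generalizing tb with
  | nil => rfl
  | cons o os ih =>
    rw [List.foldl_cons, List.foldl_cons, ih _, entry_hit o sizes tb c hn hc]

theorem counter_fold (c : Int) (hc : 0 ≤ c) (orders : List String) (xs : List (List String)) :
    orders.foldl (fun d o =>
        if 0 ≤ c ∧ c ≤ PySem.Str.len o then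
          bumpTuples d (PySem.List.combinations (pySortedChars o) c.toNat)
        else d) (PySem.Dict.counter xs) =
      PySem.Dict.counter (orders.foldl (fun order o =>
        if PySem.Str.len o < c then order
        else order ++ PySem.List.combinations (pySortedChars o) c.toNat) xs) := by
  induction orders generalizing xs with
  | nil => rfl
  | cons o os ih =>
    rw [List.foldl_cons, List.foldl_cons]
    by_cases h : PySem.Str.len o < c
    · have h1 : ¬ (0 ≤ c ∧ c ≤ PySem.Str.len o) := by omega
      rw [if_neg h1, if_pos h]
      exact ih xs
    · have h1 : 0 ≤ c ∧ c ≤ PySem.Str.len o := by omega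
      rw [if_pos h1, if_neg h, bump_counter]
      exact ih _

theorem cnt_eq (orders : List String) (courses : List Int) (c : Int)
    (hc0 : 0 ≤ c) (hc : c ∈ courses) :
    (buildTable orders (PySem.List.dedup courses)).getD c PySem.Dict.empty =
      PySem.Dict.counter (buildOrderA orders c) := by
  have hb : buildTable orders (PySem.List.dedup courses)
      = orders.foldl (fun tb o => (PySem.List.dedup courses).foldl (innerStep o) tb)
        PySem.Dict.empty := rfl
  rw [hb, table_entry orders _ _ c (PySem.List.nodup_dedup courses)
    ((PySem.List.mem_dedup courses c).mpr hc)]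
  have hseed : (PySem.Dict.empty : PySem.Dict Int (PySem.Dict (List String) Int)).getD c
      PySem.Dict.empty = PySem.Dict.counter ([] : List (List String)) := rfl
  rw [hseed, counter_fold c hc0 orders []]
  rfl

-- one course step: A (with a sorted accumulator) against B (same counter from the table)
theorem step_eq (orders : List String) (table : PySem.Dict Int (PySem.Dict (List String) Int))
    (c : Int) (ans : List (List String))
    (hc : table.getD c PySem.Dict.empty = PySem.Dict.counter (buildOrderA orders c)) :
    stepA orders (pySortTuples ans) c = pySortTuples (stepB table ans c) := by
  unfold stepA stepB
  rw [hc]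
  by_cases hemp : (PySem.Dict.counter (buildOrderA orders c)).items = []
  · simp [hemp]
  · rw [if_neg hemp, if_neg hemp]
    cases hmax : PySem.List.max? (PySem.Dict.counter (buildOrderA orders c)).values
        (fun v => v) with
    | none => rfl
    | some m => by_cases hm : m < 2 <;> simp [hm, sort_merge]

theorem fold_answer (orders : List String)
    (table : PySem.Dict Int (PySem.Dict (List String) Int)) (cs : List Int)
    (h : ∀ c ∈ cs, table.getD c PySem.Dict.empty = PySem.Dict.counter (buildOrderA orders c)) :
    ∀ ansB : List (List String),
      cs.foldl (stepA orders) (pySortTuples ansB) = pySortTuples (cs.foldl (stepB table) ansB) := by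
  induction cs with
  | nil => intro ansB; rfl
  | cons c cs ih =>
    intro ansB
    rw [List.foldl_cons, List.foldl_cons, step_eq orders table c ansB (h c List.mem_cons_self)]
    exact ih (fun c' hc' => h c' (List.mem_cons_of_mem _ hc')) _

theorem stepA_nil (ans : List (List String)) (c : Int) : stepA [] ans c = ans := rfl

theorem stepB_empty (ans : List (List String)) (c : Int) :
    stepB PySem.Dict.empty ans c = ans := rfl

theorem foldl_id {α : Type} (f : List (List String) → α → List (List String))
    (hf : ∀ a c, f a c = a) (l : List α) (a : List (List String)) : l.foldl f a = a := by
  induction l generalizing a with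
  | nil => rfl
  | cons x xs ih => rw [List.foldl_cons, hf]; exact ih a

theorem solution_nil (courses : List Int) : solution [] courses = [] := by
  unfold solution
  exact foldl_id _ stepA_nil courses []

theorem solution_alt_nil (courses : List Int) : solution_alt [] courses = [] := by
  show pySortTuples (courses.foldl (stepB PySem.Dict.empty) []) = []
  rw [foldl_id _ stepB_empty courses []]
  rfl

-- ===== VERDICT (by name: the statement is the Claim_ definition above) =====
theorem solution_spec : Claim_equal_solution := by
  intro orders courses _ hpre
  unfold Spec_solution
  rcases hpre with h0 | hpos
  · subst h0
    rw [solution_nil, solution_alt_nil]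
  · show courses.foldl (stepA orders) (pySortTuples [])
        = pySortTuples (courses.foldl (stepB (buildTable orders (PySem.List.dedup courses))) [])
    exact fold_answer orders _ courses
      (fun c hc => cnt_eq orders courses c (hpos c hc) hc) []
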